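-- pv_equiv track=rewrite | github.com/um-computacion-tm/sistemas-de-numeracion-vickytorresburgos | hex2oct.py | hex2oct
-- ===== SOURCE A (Python) =====
-- def hex2oct(hex):
--     dec = 0
--     potencia = 0
--
--     # hex a dec
--     for digito in reversed(hex):
--         if digito.isdigit():
--             dec += int(digito) * (16 ** potencia)
--         else:
--             dec += (ord(digito.upper()) - ord('A') + 10) * (16 ** potencia)
--         potencia += 1
--
--     # dec a oct
--     oct = ""
--     while dec > 0:
--         resto = dec % 8
--         oct = str(resto) + oct
--         dec = dec // 8
--
--     return oct
-- ===== SOURCE B (Python) =====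
-- def hex2oct(hex):
--     # value of the string (Horner, left to right)
--     dec = 0
--     for d in hex:
--         dec = 16 * dec + (int(d) if d.isdigit() else ord(d.upper()) - ord('A') + 10)
--     if dec <= 0:
--         return ''
--     # binary digits of dec, then read off one octal digit per 3-bit group
--     bits = bin(dec)[2:]
--     bits = '0' * (-len(bits) % 3) + bits
--     oct = ''
--     while bits:
--         g, bits = bits[:3], bits[3:]
--         oct += str(4 * (g[0] == '1') + 2 * (g[1] == '1') + (g[2] == '1'))
--     return oct
-- ===== Notes on version B (the rewrite author's own statement) =====
-- stated objective: alternative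
-- what changed: B accumulates the value by left-to-right Horner evaluation (no reversed() and no 16**i powers) and then emits the octal string by taking the binary digit string of that value, left-padding it to a multiple of three bits and reading off one octal digit per 3-bit group from the left, instead of A's repeated floor-division by 8 building the string back to front.
import Mathlib
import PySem

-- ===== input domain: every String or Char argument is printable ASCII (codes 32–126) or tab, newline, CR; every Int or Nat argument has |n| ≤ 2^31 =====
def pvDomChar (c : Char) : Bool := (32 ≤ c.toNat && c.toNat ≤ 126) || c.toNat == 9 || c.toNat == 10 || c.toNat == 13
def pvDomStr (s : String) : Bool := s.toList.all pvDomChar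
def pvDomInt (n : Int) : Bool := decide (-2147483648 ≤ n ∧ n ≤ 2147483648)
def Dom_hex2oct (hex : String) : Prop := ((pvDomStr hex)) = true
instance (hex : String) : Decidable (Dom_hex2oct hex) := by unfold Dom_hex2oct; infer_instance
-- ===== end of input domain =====

-- B accumulates the value by Horner evaluation and converts it to octal by 3-bit binary grouping,
-- instead of A's reversed() loop with 16**i powers followed by repeated division by 8 (objective: alternative).

-- ===== PORT A =====
-- A's loop body: dec += int(digito)*16**potencia if digito.isdigit() else (ord(digito.upper())-ord('A')+10)*16**potencia.
-- int(d) on a single ASCII digit character is exactly its code point minus 48 (exact on the printable-ASCII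
-- domain); potencia is a nonnegative counter, kept as a Nat exponent (exact).
def hex2octStep (st : Int × Nat) (digito : Char) : Int × Nat :=
  if PySem.Chars.isdigit digito then
    (st.1 + ((digito.toNat : Int) - 48) * 16 ^ st.2, st.2 + 1)
  else
    (st.1 + (((PySem.Chars.upperChar digito).toNat : Int) - 65 + 10) * 16 ^ st.2, st.2 + 1)

-- 'while dec > 0: resto = dec % 8; oct = str(resto) + oct; dec = dec // 8'
def hex2octLoop (dec : Int) (oct : List Char) : List Char :=
  if 0 < dec then
    hex2octLoop (PySem.Int.floordiv dec 8) (PySem.Int.toChars (PySem.Int.mod dec 8) ++ oct)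
  else oct
termination_by dec.toNat
decreasing_by
  rename_i h
  rw [PySem.Int.floordiv_eq_ediv_of_pos (by omega)]
  omega

def hex2oct (hex : String) : String :=
  let st := hex.toList.reverse.foldl hex2octStep (0, 0)
  String.mk (hex2octLoop st.1 [])

-- ===== PORT B =====
-- B's per-character value: 'int(d) if d.isdigit() else ord(d.upper()) - ord('A') + 10'
-- (int(d) on a single ASCII digit = code point - 48, exact on the printable-ASCII domain)
def digitVal (d : Char) : Int :=
  if PySem.Chars.isdigit d then (d.toNat : Int) - 48
  else ((PySem.Chars.upperChar d).toNat : Int) - 65 + 10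

-- 'bin(dec)[2:]' for dec > 0: the binary digit characters of dec, most significant first,
-- ported as Mathlib's Nat.digits in base 2 (bin() emits them most significant first, no leading zeros)
def pvBin (n : Nat) : List Char :=
  (Nat.digits 2 n).reverse.map (fun k => if k == 1 then '1' else '0')

-- 'while bits: g, bits = bits[:3], bits[3:]; oct += str(4*(g[0]=='1') + 2*(g[1]=='1') + (g[2]=='1'))'.
-- bits always has length a multiple of 3 here (Python's g[2] would raise IndexError otherwise),
-- so the leftover cases return [].
def groupOct : List Char → List Char
  | a :: b :: c :: rest =>
      PySem.Int.toChars (4 * (if a == '1' then (1:Int) else 0)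
        + 2 * (if b == '1' then (1:Int) else 0) + (if c == '1' then (1:Int) else 0)) ++ groupOct rest
  | _ => []

def hex2oct_alt (hex : String) : String :=
  -- dec = 16 * dec + (...)  over the characters, left to right
  let dec := hex.toList.foldl (fun dec d => 16 * dec + digitVal d) 0
  if dec ≤ 0 then ""
  else
    -- bits = bin(dec)[2:];  bits = '0' * (-len(bits) % 3) + bits
    let bits := pvBin dec.toNat
    let bits := List.replicate (PySem.Int.mod (-(bits.length : Int)) 3).toNat '0' ++ bits
    String.mk (groupOct bits)

-- ===== PRECONDITION & SPEC =====
def Spec_hex2oct (hex : String) (out : String) : Prop := out = hex2oct_alt hex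
instance (hex : String) (out : String) : Decidable (Spec_hex2oct hex out) := by unfold Spec_hex2oct; infer_instance

-- ===== CLAIM (what is proved, stated in full; the proofs are below) =====
def Claim_equal_hex2oct : Prop := ∀ (hex : String), Dom_hex2oct hex → Spec_hex2oct hex (hex2oct hex)

-- ===== LEMMAS AND PROOFS =====

-- B's Horner value of a character list
def hval (l : List Char) : Int := l.foldl (fun dec d => 16 * dec + digitVal d) 0

-- value of a bit string read in binary, with accumulator
def bval (a : Nat) (s : List Char) : Nat := s.foldl (fun x c => 2 * x + (if c == '1' then 1 else 0)) a

-- the octal digit characters of n, most significant first (empty for 0)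
def octChars (n : Nat) : List Char := (Nat.digits 8 n).reverse.flatMap (fun k => PySem.Int.toChars (k : Int))

theorem bval_append (a : Nat) (s t : List Char) : bval a (s ++ t) = bval (bval a s) t := by
  simp [bval, List.foldl_append]

theorem bval_le (a : Nat) (s : List Char) : a ≤ bval a s := by
  induction s generalizing a with
  | nil => simp [bval]
  | cons c t ih =>
    have h1 : bval a (c :: t) = bval (2 * a + (if c == '1' then 1 else 0)) t := rfl
    rw [h1]
    refine le_trans ?_ (ih _)
    split <;> omega

theorem bval_three (x : Nat) (a b c : Char) : bval x [a, b, c] = 8 * x + bval 0 [a, b, c] := by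
  simp [bval]; split_ifs <;> omega

theorem bval_replicate (a p : Nat) (s : List Char) :
    bval a (List.replicate p '0' ++ s) = bval (a * 2 ^ p) s := by
  induction p generalizing a with
  | zero => simp
  | succ p ih =>
    rw [List.replicate_succ, List.cons_append]
    have h1 : bval a (('0' :: (List.replicate p '0' ++ s))) =
        bval (2 * a + (if '0' == '1' then 1 else 0)) (List.replicate p '0' ++ s) := rfl
    rw [h1, show (2 * a + if ('0':Char) == '1' then 1 else 0) = 2 * a by rw [if_neg (by decide)]; omega, ih]
    congr 1
    rw [pow_succ]; ring

theorem hval_snoc (l : List Char) (c : Char) : hval (l ++ [c]) = 16 * hval l + digitVal c := by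
  simp [hval, List.foldl_append]

theorem step_val (c : Char) (d : Int) (p : Nat) :
    hex2octStep (d, p) c = (d + digitVal c * 16 ^ p, p + 1) := by
  simp only [hex2octStep, digitVal]
  split <;> rfl

theorem foldA (r : List Char) (d : Int) (p : Nat) :
    r.foldl hex2octStep (d, p) = (d + hval r.reverse * 16 ^ p, p + r.length) := by
  induction r generalizing d p with
  | nil => simp [hval]
  | cons c r' ih =>
    rw [List.foldl_cons, step_val, ih, List.reverse_cons, hval_snoc]
    refine Prod.ext ?_ (by simp; omega)
    show (d + digitVal c * 16 ^ p) + hval r'.reverse * 16 ^ (p + 1)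
        = d + (16 * hval r'.reverse + digitVal c) * 16 ^ p
    ring

theorem octChars_step (v g : Nat) (hg : g < 8) (hpos : 0 < 8 * v + g) :
    octChars (8 * v + g) = octChars v ++ PySem.Int.toChars (g : Int) := by
  unfold octChars
  rw [Nat.digits_def' (by norm_num : 1 < 8) hpos,
    show (8 * v + g) % 8 = g by omega, show (8 * v + g) / 8 = v by omega]
  simp

theorem hex2octLoop_spec (n : Nat) (acc : List Char) :
    hex2octLoop (n : Int) acc = octChars n ++ acc := by
  induction n using Nat.strong_induction_on generalizing acc with
  | _ n ih =>
    rw [hex2octLoop]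
    by_cases h : 0 < n
    · rw [if_pos (by exact_mod_cast h)]
      have hd : PySem.Int.floordiv (n : Int) 8 = ((n / 8 : Nat) : Int) := by
        rw [PySem.Int.floordiv_eq_ediv_of_pos (by norm_num)]
        norm_cast
      have hm : PySem.Int.mod (n : Int) 8 = ((n % 8 : Nat) : Int) := by
        rw [PySem.Int.mod_eq_emod_of_pos (by norm_num)]
        norm_cast
      rw [hd, hm, ih (n / 8) (Nat.div_lt_self h (by norm_num))]
      have hrep : n = 8 * (n / 8) + n % 8 := by omega
      rw [show octChars n = octChars (n / 8) ++ PySem.Int.toChars ((n % 8 : Nat) : Int) by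
        conv_lhs => rw [hrep]
        exact octChars_step (n / 8) (n % 8) (by omega) (by omega)]
      simp
    · rw [if_neg (by simp; omega)]
      have h0 : n = 0 := by omega
      subst h0
      simp [octChars]

theorem hex2octLoop_int (d : Int) (acc : List Char) :
    hex2octLoop d acc = octChars d.toNat ++ acc := by
  by_cases h : 0 < d
  · rw [show d = (d.toNat : Int) by omega]
    exact hex2octLoop_spec d.toNat acc
  · rw [hex2octLoop, if_neg h, show d.toNat = 0 by omega]
    simp [octChars]

theorem group_append_aux (n : Nat) : ∀ s t : List Char, s.length = n → 3 ∣ n →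
    groupOct (s ++ t) = groupOct s ++ groupOct t := by
  induction n using Nat.strong_induction_on with
  | _ n ih =>
    intro s t hlen hdvd
    match s, hlen with
    | [], _ => simp [groupOct]
    | [a], hlen => exact absurd hdvd (by rw [← hlen]; simp only [List.length_singleton]; decide)
    | [a, b], hlen => exact absurd hdvd (by rw [← hlen]; simp only [List.length_cons, List.length_nil]; decide)
    | a :: b :: c :: s', hlen =>
      simp only [List.length_cons] at hlen
      simp only [List.cons_append, groupOct]
      rw [ih s'.length (by omega) s' t rfl (by omega), List.append_assoc]

theorem group_append (s t : List Char) (h : 3 ∣ s.length) :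
    groupOct (s ++ t) = groupOct s ++ groupOct t :=
  group_append_aux s.length s t rfl h

theorem exists_snoc3 (s : List Char) (h : 3 ∣ s.length) (hne : s ≠ []) :
    ∃ t a b c, s = t ++ [a, b, c] ∧ 3 ∣ t.length := by
  have hlen : s.reverse.length = s.length := List.length_reverse
  match hr : s.reverse with
  | [] =>
    exact absurd (by simpa using congrArg List.reverse hr) hne
  | [x] => rw [hr] at hlen; simp at hlen; omega
  | [x, y] => rw [hr] at hlen; simp at hlen; omega
  | x :: y :: z :: r =>
    refine ⟨r.reverse, z, y, x, ?_, ?_⟩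
    · have := congrArg List.reverse hr
      simpa using this
    · rw [hr] at hlen
      simp only [List.length_cons] at hlen
      rw [List.length_reverse]
      omega

theorem group_three (a b c : Char) (ha : a = '0' ∨ a = '1') (hb : b = '0' ∨ b = '1')
    (hc : c = '0' ∨ c = '1') :
    groupOct [a, b, c] = PySem.Int.toChars ((bval 0 [a, b, c] : Nat) : Int) ∧ bval 0 [a, b, c] < 8 := by
  rcases ha with rfl|rfl <;> rcases hb with rfl|rfl <;> rcases hc with rfl|rfl <;>
    exact ⟨by decide, by decide⟩

theorem bval_pos_of_take (t : List Char) (h : bval 0 (t.take 3) ≠ 0) : 0 < bval 0 t := by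
  have hsplit : bval 0 t = bval (bval 0 (t.take 3)) (t.drop 3) := by
    conv_lhs => rw [← List.take_append_drop 3 t]
    rw [bval_append]
  have := bval_le (bval 0 (t.take 3)) (t.drop 3)
  omega

theorem group_main_aux (n : Nat) : ∀ s : List Char, s.length = n →
    (∀ c ∈ s, c = '0' ∨ c = '1') → 3 ∣ n → (s = [] ∨ bval 0 (s.take 3) ≠ 0) →
    groupOct s = octChars (bval 0 s) := by
  induction n using Nat.strong_induction_on with
  | _ n ih =>
    intro s hlen hs hdvd hhead
    by_cases hne : s = []
    · subst hne
      simp [groupOct, bval, octChars]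
    obtain ⟨t, a, b, c, rfl, ht3⟩ := exists_snoc3 s (hlen ▸ hdvd) hne
    have hba : a = '0' ∨ a = '1' := hs a (by simp)
    have hbb : b = '0' ∨ b = '1' := hs b (by simp)
    have hbc : c = '0' ∨ c = '1' := hs c (by simp)
    obtain ⟨hgoct, hglt⟩ := group_three a b c hba hbb hbc
    have hsplit : bval 0 (t ++ [a, b, c]) = 8 * bval 0 t + bval 0 [a, b, c] := by
      rw [bval_append, bval_three]
    rw [group_append t [a, b, c] ht3, hgoct, hsplit]
    rcases hhead with h | hh
    · exact absurd h hne
    by_cases htne : t = []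
    · subst htne
      simp only [List.nil_append] at hh ⊢
      have hgpos : 0 < bval 0 [a, b, c] := by
        have : ([a, b, c].take 3) = [a, b, c] := rfl
        rw [this] at hh
        omega
      rw [show bval 0 ([] : List Char) = 0 from rfl,
        octChars_step 0 (bval 0 [a, b, c]) hglt (by omega)]
      simp [octChars, groupOct]
    · have hlent : 3 ≤ t.length := by
        rcases ht3 with ⟨k, hk⟩
        cases t with
        | nil => exact absurd rfl htne
        | cons x xs => simp at hk ⊢; omega
      have htake : t.take 3 = (t ++ [a, b, c]).take 3 :=
        (List.take_append_of_le_length hlent).symm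
      have hvpos : 0 < bval 0 t := bval_pos_of_take t (by rw [htake]; exact hh)
      have hlt : t.length < n := by
        have : (t ++ [a, b, c]).length = n := hlen
        simp at this
        omega
      rw [ih t.length hlt t rfl (fun x hx => hs x (by simp [hx])) ht3
        (Or.inr (by rw [htake]; exact hh)),
        octChars_step (bval 0 t) (bval 0 [a, b, c]) hglt (by omega)]

theorem group_main (s : List Char) (hs : ∀ c ∈ s, c = '0' ∨ c = '1') (h3 : 3 ∣ s.length)
    (hhead : s = [] ∨ bval 0 (s.take 3) ≠ 0) :
    groupOct s = octChars (bval 0 s) :=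
  group_main_aux s.length s rfl hs h3 hhead

theorem pvBin_bits (n : Nat) : ∀ c ∈ pvBin n, c = '0' ∨ c = '1' := by
  intro c hc
  rw [pvBin, List.mem_map] at hc
  obtain ⟨k, _, hk⟩ := hc
  rw [← hk]
  split <;> simp

theorem bval_pvBin (n : Nat) : ∀ a : Nat, bval a (pvBin n) = a * 2 ^ (pvBin n).length + n := by
  induction n using Nat.strong_induction_on with
  | _ n ih =>
    intro a
    by_cases h : n = 0
    · subst h; simp [pvBin, bval]
    · have hrec : Nat.digits 2 n = n % 2 :: Nat.digits 2 (n / 2) :=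
        Nat.digits_def' (by norm_num) (by omega)
      have hsnoc : pvBin n = pvBin (n / 2) ++ [if (n % 2) == 1 then '1' else '0'] := by
        rw [pvBin, hrec, List.reverse_cons, List.map_append, ← pvBin]
        rfl
      rw [hsnoc, bval_append, ih (n / 2) (by omega) a]
      have hbit : bval (a * 2 ^ (pvBin (n / 2)).length + n / 2)
          [if (n % 2) == 1 then '1' else '0']
          = 2 * (a * 2 ^ (pvBin (n / 2)).length + n / 2) + (n % 2) := by
        show (2 * _ + if (if (n % 2) == 1 then '1' else '0') == '1' then 1 else 0) = _
        rcases Nat.mod_two_eq_zero_or_one n with h2 | h2 <;> (rw [h2]; norm_num) <;> decide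
      rw [hbit, List.length_append, List.length_singleton, pow_succ]
      ring_nf
      omega

theorem pvBin_head (n : Nat) (hn : 0 < n) : ∃ r, pvBin n = '1' :: r := by
  have hne : Nat.digits 2 n ≠ [] := Nat.digits_ne_nil_iff_ne_zero.mpr (by omega)
  obtain ⟨x, l, hxl⟩ := List.exists_cons_of_ne_nil
    (show (Nat.digits 2 n).reverse ≠ [] by simpa using hne)
  have hx : x = (Nat.digits 2 n).getLast hne := by
    have := List.getLast?_eq_getLast (l := Nat.digits 2 n) hne
    rw [← List.head?_reverse, hxl] at this
    simpa using this
  have hx1 : x = 1 := by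
    have hne0 : (Nat.digits 2 n).getLast hne ≠ 0 := Nat.getLast_digit_ne_zero 2 (by omega)
    have hlt : (Nat.digits 2 n).getLast hne < 2 :=
      Nat.digits_lt_base (by norm_num) (List.getLast_mem hne)
    omega
  refine ⟨l.map (fun k => if k == 1 then '1' else '0'), ?_⟩
  rw [pvBin, hxl, hx1]
  rfl

-- ===== VERDICT (by name: the statement is the Claim_ definition above) =====
theorem hex2oct_spec : Claim_equal_hex2oct := by
  intro hex _
  unfold Spec_hex2oct hex2oct hex2oct_alt
  set l := hex.toList with hl
  -- A's accumulated decimal equals B's Horner value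
  have hA := foldA l.reverse 0 0
  rw [List.reverse_reverse] at hA
  rw [hA]
  simp only [pow_zero, mul_one, zero_add]
  rw [hex2octLoop_int (hval l) [], List.append_nil]
  show String.mk (octChars (hval l).toNat) = _
  have hfold : List.foldl (fun dec d => 16 * dec + digitVal d) 0 l = hval l := rfl
  rw [hfold]
  by_cases hd : hval l ≤ 0
  · rw [if_pos hd, show (hval l).toNat = 0 by omega]
    rfl
  · rw [if_neg hd]
    set m := (hval l).toNat with hm
    set bits1 := pvBin m with hb1
    have hmpos : 0 < m := by omega
    obtain ⟨r, hr⟩ := pvBin_head m hmpos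
    have hv1 : bval 0 bits1 = m := by
      rw [hb1, bval_pvBin m 0]; omega
    have hbits1 : ∀ c ∈ bits1, c = '0' ∨ c = '1' := pvBin_bits m
    set p := PySem.Int.mod (-(bits1.length : Int)) 3 with hp
    have hpemod : p = (-(bits1.length : Int)) % 3 := by
      rw [hp, PySem.Int.mod_eq_emod_of_pos (by norm_num)]
    have hp0 : 0 ≤ p := by rw [hpemod]; omega
    have hp3 : p < 3 := by rw [hpemod]; omega
    have hpd : 3 ∣ (p.toNat + bits1.length) := by
      have h1 : ((p.toNat : Int)) = p := Int.toNat_of_nonneg hp0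
      have : (3 : Int) ∣ (p + bits1.length) := by rw [hpemod]; omega
      omega
    set bits := List.replicate p.toNat '0' ++ bits1 with hb
    have hbitsall : ∀ c ∈ bits, c = '0' ∨ c = '1' := by
      intro c hc
      rw [hb, List.mem_append] at hc
      rcases hc with hc | hc
      · exact Or.inl (List.eq_of_mem_replicate hc)
      · exact hbits1 c hc
    have hvb : bval 0 bits = m := by
      rw [hb, bval_replicate, zero_mul, hv1]
    have hlenb : 3 ∣ bits.length := by
      rw [hb, List.length_append, List.length_replicate]
      exact hpd
    have hhead : bits = [] ∨ bval 0 (bits.take 3) ≠ 0 := by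
      right
      rw [hb, show bits1 = '1' :: r from hr]
      have hkle : p.toNat ≤ 2 := by omega
      have htake : (List.replicate p.toNat '0' ++ '1' :: r).take 3 =
          List.replicate p.toNat '0' ++ ('1' :: r).take (3 - p.toNat) := by
        rw [List.take_append, List.take_replicate, List.length_replicate,
          show min 3 p.toNat = p.toNat by omega]
      rw [htake, bval_replicate, zero_mul]
      have hstep : ('1' :: r).take (3 - p.toNat) = '1' :: r.take (2 - p.toNat) := by
        rw [show 3 - p.toNat = (2 - p.toNat) + 1 by omega]
        rfl
      rw [hstep]
      have h1 : bval 0 ('1' :: r.take (2 - p.toNat)) = bval 1 (r.take (2 - p.toNat)) := by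
        show bval (2 * 0 + if ('1':Char) == '1' then 1 else 0) _ = _
        norm_num
      rw [h1]
      have := bval_le 1 (r.take (2 - p.toNat))
      omega
    rw [group_main bits hbitsall hlenb hhead, hvb]
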